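-- pv_equiv track=rewrite | github.com/Joshuafy/mount-and-blade-troop-item-slot-generator | pop_itemslots.py | getSpeedRating
-- ===== SOURCE A (Python) =====
-- def getSpeedRating(line):
-- 	i = line.find('spd_rtng(')
-- 	if i != -1:
-- 		spd_rating = ''
-- 		for c in range(i + 9, len(line)):
-- 			if line[c] == ')':
-- 				break
-- 			else:
-- 				spd_rating += line[c]
-- 		return spd_rating
-- ===== SOURCE B (Python) =====
-- def getSpeedRating(line):
--     i = line.find('spd_rtng(')
--     if i == -1:
--         return None
--     rest = line[i + 9:]
--     j = rest.find(')')
--     return rest if j == -1 else rest[:j]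
-- ===== Notes on version B (the rewrite author's own statement) =====
-- stated objective: idiomatic
-- what changed: Replaces the character-by-character index loop with break and string accumulation by slicing the text after the marker and locating the closing parenthesis with a second find, then taking one slice of the result.
import Mathlib
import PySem

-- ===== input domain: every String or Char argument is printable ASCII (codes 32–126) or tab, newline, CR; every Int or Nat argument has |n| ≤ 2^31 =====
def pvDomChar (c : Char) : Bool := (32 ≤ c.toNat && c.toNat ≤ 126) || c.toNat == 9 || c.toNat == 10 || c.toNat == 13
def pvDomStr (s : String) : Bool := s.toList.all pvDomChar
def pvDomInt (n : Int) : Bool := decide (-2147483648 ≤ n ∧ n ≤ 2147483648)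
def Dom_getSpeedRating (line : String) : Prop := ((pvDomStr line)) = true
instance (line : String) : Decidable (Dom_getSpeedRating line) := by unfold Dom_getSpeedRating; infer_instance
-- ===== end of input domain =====

-- B replaces A's index loop with a break by a slice after the marker and a second find; objective: idiomatic.

-- ===== PORT A =====
-- the for-loop over range(i+9, len(line)) with its break, on line.toList;
-- s[c]? = none is unreachable (stop = length) and ports the loop's bound faithfully
def pvLoopA (s : List Char) (c stop : Nat) (acc : List Char) : List Char :=
  if _h : c < stop then
    match s[c]? with
    | some ch => if ch = ')' then acc else pvLoopA s (c+1) stop (acc ++ [ch])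
    | none => acc
  else acc
termination_by stop - c

def getSpeedRating (line : String) : Option String :=
  let i := PySem.Str.find line "spd_rtng("
  if i ≠ -1 then
    some (String.ofList (pvLoopA line.toList (i + 9).toNat line.toList.length []))
  else
    none

-- ===== PORT B =====
def getSpeedRating_alt (line : String) : Option String :=
  let i := PySem.Str.find line "spd_rtng("
  if i = -1 then none
  else
    let rest := PySem.Str.slice line (some (i + 9)) none
    let j := PySem.Str.find rest ")"
    if j = -1 then some rest else some (PySem.Str.slice rest none (some j))

-- ===== PRECONDITION & SPEC =====
def Spec_getSpeedRating (line : String) (out : Option String) : Prop := out = getSpeedRating_alt line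
instance (line : String) (out : Option String) : Decidable (Spec_getSpeedRating line out) := by unfold Spec_getSpeedRating; infer_instance

-- ===== CLAIM (what is proved, stated in full; the proofs are below) =====
def Claim_equal_getSpeedRating : Prop := ∀ (line : String), Dom_getSpeedRating line → Spec_getSpeedRating line (getSpeedRating line)

-- ===== LEMMAS AND PROOFS =====

theorem pvLoopA_eq (s : List Char) (c : Nat) (acc : List Char) :
    pvLoopA s c s.length acc = acc ++ (s.drop c).takeWhile (fun ch => ch != ')') := by
  fun_induction pvLoopA s c s.length acc with
  | case1 c acc hc hch =>
    have hgc : s[c] = ')' := by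
      have := (List.getElem?_eq_some_iff.mp hch).2
      simpa using this
    rw [List.drop_eq_getElem_cons hc, hgc]
    simp
  | case2 c acc hc ch hch hpar ih =>
    have hgc : s[c] = ch := by
      have := (List.getElem?_eq_some_iff.mp hch).2
      simpa using this
    rw [ih, List.drop_eq_getElem_cons hc, hgc]
    simp [hpar]
  | case3 c acc hc hch =>
    exact absurd (List.getElem?_eq_none_iff.mp hch) (by omega)
  | case4 c acc hc =>
    rw [List.drop_eq_nil_of_le (by omega)]
    simp

theorem takeWhile_eq_self_of_no_paren (l : List Char) (h : ')' ∉ l) :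
    l.takeWhile (fun ch => ch != ')') = l := by
  induction l with
  | nil => rfl
  | cons x xs ih =>
    have hx : x ≠ ')' := fun hx => h (hx ▸ List.mem_cons_self ..)
    simp only [List.takeWhile_cons]
    rw [if_pos (by simpa using hx)]
    rw [ih (fun hm => h (List.mem_cons_of_mem _ hm))]

theorem takeWhile_eq_take (l : List Char) (j : Nat)
    (hlt : ∀ i, i < j → ¬ [')'] <+: l.drop i) (hj : [')'] <+: l.drop j) :
    l.takeWhile (fun ch => ch != ')') = l.take j := by
  induction l generalizing j with
  | nil =>
    simp at hj
  | cons x xs ih =>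
    cases j with
    | zero =>
      simp only [List.drop_zero] at hj
      obtain ⟨t, ht⟩ := hj
      cases ht
      simp
    | succ k =>
      have hx : x ≠ ')' := by
        intro hx
        exact hlt 0 (Nat.succ_pos k) ⟨xs, by rw [hx]; rfl⟩
      simp only [List.takeWhile_cons, List.take_succ_cons]
      rw [if_pos (by simpa using hx)]
      rw [ih k (fun i hi => hlt (i+1) (by omega)) hj]


-- ===== VERDICT (by name: the statement is the Claim_ definition above) =====
theorem getSpeedRating_spec : Claim_equal_getSpeedRating := by
  intro line _
  unfold Spec_getSpeedRating getSpeedRating getSpeedRating_alt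
  simp only [PySem.Str.find_eq, ite_not,
    show "spd_rtng(".toList = ['s','p','d','_','r','t','n','g','('] from rfl,
    show ")".toList = [')'] from rfl]
  set C := PySem.Chars.find line.toList ['s','p','d','_','r','t','n','g','('] with hC
  by_cases h : C = -1
  · simp [h]
  · rw [if_neg h, if_neg h]
    have hb := PySem.Chars.neg_one_le_find line.toList ['s','p','d','_','r','t','n','g','(']
    rw [← hC] at hb
    have hsl : PySem.List.slice line.toList (some (C + 9)) =
        line.toList.drop (C.toNat + 9) := by
      rw [PySem.List.slice_from _ (by omega)]
      congr 1
      omega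
    have hrt : (PySem.Str.slice line (some (C + 9))).toList =
        line.toList.drop (C.toNat + 9) := by
      rw [PySem.Str.toList_slice, PySem.Chars.slice_eq_listSlice, hsl]
    rw [hrt]
    set R := line.toList.drop (C.toNat + 9) with hR
    have hloop : String.ofList (pvLoopA line.toList (C + 9).toNat line.toList.length []) =
        String.ofList (R.takeWhile (fun ch => ch != ')')) := by
      rw [show (C + 9).toNat = C.toNat + 9 by omega, pvLoopA_eq, hR, List.nil_append]
    rw [hloop]
    by_cases hj : PySem.Chars.find R [')'] = -1
    · rw [if_pos hj]
      refine congrArg some (String.toList_inj.mp ?_)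
      rw [String.toList_ofList, hrt]
      exact takeWhile_eq_self_of_no_paren R (fun hmem =>
        (PySem.Chars.find_eq_neg_one_iff R [')']).mp hj ((List.singleton_infix_iff ')' R).mpr hmem))
    · rw [if_neg hj]
      have hb2 := PySem.Chars.neg_one_le_find R [')']
      have hge2 : 0 ≤ PySem.Chars.find R [')'] := by omega
      have hspec2 := PySem.Chars.find_spec hge2
      refine congrArg some (String.toList_inj.mp ?_)
      simp only [String.toList_ofList, PySem.Str.toList_slice, PySem.Chars.slice_eq_listSlice]
      rw [hsl, PySem.List.slice_to _ hge2]
      exact takeWhile_eq_take R (PySem.Chars.find R [')']).toNat hspec2.2 hspec2.1
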